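-- pv_equiv track=rewrite | github.com/wujunzhuo/lento | lento/server.py | split_by_lines
-- ===== SOURCE A (Python) =====
-- from typing import List, Optional
--
-- def split_by_lines(input: str, max_lines: int | None) -> List[str]:
--     if not max_lines:
--         return [input]
--
--     lines = input.split('\n')
--     result = []
--     current_block = []
--
--     for line in lines:
--         current_block.append(line)
--         if len(current_block) >= max_lines:
--             result.append('\n'.join(current_block))
--             current_block = []
--
--     if current_block:
--         result.append('\n'.join(current_block))
--
--     return result
-- ===== SOURCE B (Python) =====
-- def split_by_lines(input, max_lines):
--     if not max_lines:
--         return [input]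
--     lines = input.split('\n')
--     step = max(max_lines, 1)
--     return ['\n'.join(lines[i:i + step]) for i in range(0, len(lines), step)]
-- ===== Notes on version B (the rewrite author's own statement) =====
-- stated objective: idiomatic
-- what changed: A's per-line accumulate-and-flush loop with two mutable lists is replaced by a slice-based comprehension over precomputed chunk start indices (range(0, len(lines), step) with step clamped to at least 1 so non-positive max_lines still flushes every line).
import Mathlib
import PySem

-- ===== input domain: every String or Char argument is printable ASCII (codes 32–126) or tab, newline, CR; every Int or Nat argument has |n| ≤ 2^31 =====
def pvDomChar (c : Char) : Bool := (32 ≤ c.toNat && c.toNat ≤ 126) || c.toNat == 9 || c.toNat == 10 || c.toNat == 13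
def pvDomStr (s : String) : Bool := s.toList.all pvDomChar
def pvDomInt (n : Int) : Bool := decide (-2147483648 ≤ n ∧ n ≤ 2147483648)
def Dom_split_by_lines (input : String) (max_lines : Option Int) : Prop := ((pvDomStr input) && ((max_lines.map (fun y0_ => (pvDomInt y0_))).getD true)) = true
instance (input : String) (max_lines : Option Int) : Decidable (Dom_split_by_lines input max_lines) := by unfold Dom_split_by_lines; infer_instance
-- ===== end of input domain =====

-- B replaces A's per-line accumulate-and-flush loop (two mutable lists) by a slice-based
-- comprehension over precomputed chunk start indices; same return value, objective: idiomatic.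

-- ===== PORT A =====
-- loop body: current_block.append(line); if len(current_block) >= max_lines: flush
def pvStepA (m : Int) (st : List String × List String) (line : String) : List String × List String :=
  let cb := st.2 ++ [line]
  if m ≤ (cb.length : Int) then (st.1 ++ [PySem.Str.join "\n" cb], [])
  else (st.1, cb)

-- trailing: if current_block: result.append('\n'.join(current_block))
def pvFlushA (st : List String × List String) : List String :=
  if st.2 ≠ [] then st.1 ++ [PySem.Str.join "\n" st.2] else st.1

def split_by_lines (input : String) (max_lines : Option Int) : List String :=
  match max_lines with
  | none => [input]
  | some m =>
    if m = 0 then [input]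
    else
      let lines := (PySem.Str.split? input "\n").getD []
      pvFlushA (lines.foldl (pvStepA m) ([], []))

-- ===== PORT B =====
def split_by_lines_alt (input : String) (max_lines : Option Int) : List String :=
  match max_lines with
  | none => [input]
  | some m =>
    if m = 0 then [input]
    else
      let lines := (PySem.Str.split? input "\n").getD []
      let step := max m 1
      (PySem.List.pyRange 0 (lines.length : Int) step).map
        (fun i => PySem.Str.join "\n" (PySem.List.slice lines (some i) (some (i + step))))

-- ===== PRECONDITION & SPEC =====
def Spec_split_by_lines (input : String) (max_lines : Option Int) (out : List String) : Prop := out = split_by_lines_alt input max_lines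
instance (input : String) (max_lines : Option Int) (out : List String) : Decidable (Spec_split_by_lines input max_lines out) := by unfold Spec_split_by_lines; infer_instance

-- ===== CLAIM (what is proved, stated in full; the proofs are below) =====
def Claim_equal_split_by_lines : Prop := ∀ (input : String) (max_lines : Option Int), Dom_split_by_lines input max_lines → Spec_split_by_lines input max_lines (split_by_lines input max_lines)

-- ===== LEMMAS AND PROOFS =====

-- the list of chunks of k consecutive lines (k ≥ 1 intended)
def pvChunks (k : Nat) (xs : List String) : List (List String) :=
  match xs with
  | [] => []
  | x :: rest => (x :: rest.take (k - 1)) :: pvChunks k (rest.drop (k - 1))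
termination_by xs.length
decreasing_by simp

lemma pvChunks_nil (k : Nat) : pvChunks k [] = [] := by
  simp [pvChunks]

lemma pvChunks_cons' (k : Nat) (x : String) (rest : List String) :
    pvChunks k (x :: rest) = (x :: rest.take (k - 1)) :: pvChunks k (rest.drop (k - 1)) := by
  simp [pvChunks]

lemma pvChunks_cons (k : Nat) (hk : 1 ≤ k) (x : String) (rest : List String) :
    pvChunks k (x :: rest) = (x :: rest).take k :: pvChunks k ((x :: rest).drop k) := by
  cases k with
  | zero => omega
  | succ k => rw [pvChunks_cons']; simp

lemma pvChunks_head_append (k : Nat) (c t : List String) (hc : c.length = k) (hne : c ≠ []) :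
    pvChunks k (c ++ t) = c :: pvChunks k t := by
  cases c with
  | nil => exact absurd rfl hne
  | cons x rest =>
    have hr : rest.length = k - 1 := by simp at hc; omega
    simp only [List.cons_append]
    rw [pvChunks_cons', List.take_left' hr, List.drop_left' hr]

-- A's loop with invariant: partial block shorter than the chunk size
lemma pvLoopA (m : Int) (ls acc cur : List String)
    (hcur : cur.length < (max m 1).toNat) :
    pvFlushA (ls.foldl (pvStepA m) (acc, cur))
      = acc ++ (pvChunks (max m 1).toNat (cur ++ ls)).map (PySem.Str.join "\n") := by
  induction ls generalizing acc cur with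
  | nil =>
    simp only [List.foldl_nil, List.append_nil]
    cases cur with
    | nil => simp [pvFlushA, pvChunks_nil]
    | cons c rest =>
      have h1 : rest.take ((max m 1).toNat - 1) = rest :=
        List.take_of_length_le (by simp at hcur; omega)
      have h2 : rest.drop ((max m 1).toNat - 1) = [] :=
        List.drop_eq_nil_of_le (by simp at hcur; omega)
      simp [pvFlushA, pvChunks_cons', pvChunks_nil, h1, h2]
  | cons l t ih =>
    have h1le : (1 : Int) ≤ max m 1 := le_max_right m 1
    have hK1 : 1 ≤ (max m 1).toNat := by omega
    have hlen1 : (cur ++ [l]).length = cur.length + 1 := by simp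
    have hKm : ((max m 1).toNat : Int) = max m 1 := Int.toNat_of_nonneg (by omega)
    have hK2 : m ≤ max m 1 := le_max_left m 1
    have hiff : (m ≤ ((cur ++ [l]).length : Int)) ↔ ((max m 1).toNat ≤ (cur ++ [l]).length) := by
      rw [hlen1]
      rcases max_choice m 1 with h | h <;> rw [h] at hKm hK2 <;> omega
    simp only [List.foldl_cons]
    by_cases h : m ≤ (((cur ++ [l]).length : Int))
    · have hlenK : (cur ++ [l]).length = (max m 1).toNat := by
        have h' := hiff.mp h
        rw [hlen1] at h' ⊢
        omega
      have hstep : pvStepA m (acc, cur) l = (acc ++ [PySem.Str.join "\n" (cur ++ [l])], []) := by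
        simp only [pvStepA]
        rw [if_pos h]
      rw [hstep, ih _ [] (by simp)]
      have hsplit : cur ++ l :: t = (cur ++ [l]) ++ t := by simp
      rw [hsplit, pvChunks_head_append _ _ t hlenK (by simp)]
      simp
    · have hlt : (cur ++ [l]).length < (max m 1).toNat := by
        have h' := (not_iff_not.mpr hiff).mp h
        omega
      have hstep : pvStepA m (acc, cur) l = (acc, cur ++ [l]) := by
        simp only [pvStepA]
        rw [if_neg h]
      rw [hstep, ih acc (cur ++ [l]) hlt]
      simp

-- chunking as a map over chunk start indices
lemma pvChunks_eq_range (k : Nat) (hk : 1 ≤ k) :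
    ∀ (n : Nat) (ls : List String), ls.length ≤ n →
      pvChunks k ls = (List.range ((ls.length + k - 1) / k)).map (fun j => (ls.drop (j * k)).take k) := by
  intro n
  induction n with
  | zero =>
    intro ls h
    have hnil : ls = [] := by cases ls <;> simp_all
    subst hnil
    simp [pvChunks_nil, Nat.div_eq_of_lt (by omega : k - 1 < k)]
  | succ n ih =>
    intro ls h
    cases ls with
    | nil => simp [pvChunks_nil, Nat.div_eq_of_lt (by omega : k - 1 < k)]
    | cons x rest =>
      rw [pvChunks_cons k hk,
        ih ((x :: rest).drop k) (by simp only [List.length_cons, List.length_drop] at h ⊢; omega)]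
      have hcnt : ((x :: rest).length + k - 1) / k = (((x :: rest).drop k).length + k - 1) / k + 1 := by
        simp only [List.length_cons, List.length_drop]
        rcases Nat.le_total k (rest.length + 1) with hle | hle
        · have e1 : rest.length + 1 + k - 1 = rest.length + k := by omega
          have e2 : rest.length + 1 - k + k - 1 = rest.length := by omega
          rw [e1, e2, Nat.add_div_right _ (by omega)]
        · have e1 : rest.length + 1 - k = 0 := by omega
          rw [e1]
          have e2 : rest.length + 1 + k - 1 = rest.length + k := by omega
          rw [e2, Nat.add_div_right _ (by omega), Nat.div_eq_of_lt (by omega), Nat.div_eq_of_lt (by omega)]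
      rw [hcnt, List.range_succ_eq_map]
      simp only [List.map_cons, List.map_map, Nat.zero_mul, List.drop_zero]
      congr 1
      apply List.map_congr_left
      intro j _
      simp only [Function.comp_apply]
      rw [List.drop_drop]
      congr 2
      rw [Nat.succ_mul]
      omega

-- the element count pyRange_of_pos produces, in Nat form
lemma pvCnt (k n : Nat) (hk : 1 ≤ k) :
    (if (0 : Int) < (n : Int) then (((n : Int) - 0 + (k : Int) - 1) / (k : Int)).toNat else 0)
      = (n + k - 1) / k := by
  rcases Nat.eq_zero_or_pos n with h | h
  · subst h
    simp [Nat.div_eq_of_lt (by omega : k - 1 < k)]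
  · rw [if_pos (by exact_mod_cast h)]
    have h1 : ((n : Int) - 0 + (k : Int) - 1) = ((n + k - 1 : Nat) : Int) := by omega
    rw [h1, ← Int.natCast_div]
    exact Int.toNat_natCast _

-- B's slice comprehension computes the chunks
lemma pvRangeB (k : Nat) (hk : 1 ≤ k) (ls : List String) :
    (PySem.List.pyRange 0 (ls.length : Int) (k : Int)).map
        (fun i => PySem.Str.join "\n" (PySem.List.slice ls (some i) (some (i + (k : Int)))))
      = (pvChunks k ls).map (PySem.Str.join "\n") := by
  have hk0 : (0 : Int) < (k : Int) := by omega
  rw [PySem.List.pyRange_of_pos 0 (ls.length : Int) hk0]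
  rw [pvCnt k ls.length hk, pvChunks_eq_range k hk ls.length ls le_rfl]
  simp only [List.map_map]
  apply List.map_congr_left
  intro j _
  simp only [Function.comp_apply]
  have e : (0 : Int) + (k : Int) * (j : Int) = ((j * k : Nat) : Int) := by push_cast; ring
  rw [e, PySem.List.slice_natCast_add]

-- ===== VERDICT (by name: the statement is the Claim_ definition above) =====
theorem split_by_lines_spec : Claim_equal_split_by_lines := by
  intro input ml _
  unfold Spec_split_by_lines
  cases ml with
  | none => rfl
  | some m =>
    by_cases h0 : m = 0
    · simp [split_by_lines, split_by_lines_alt, h0]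
    · have h1 : (1 : Int) ≤ max m 1 := le_max_right m 1
      have hK1 : 1 ≤ (max m 1).toNat := by omega
      have hmax : ((max m 1).toNat : Int) = max m 1 := Int.toNat_of_nonneg (by omega)
      simp only [split_by_lines, split_by_lines_alt, if_neg h0]
      rw [← hmax]
      rw [pvRangeB (max m 1).toNat hK1]
      rw [pvLoopA m _ [] [] (by simp)]
      simp
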